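-- pv_equiv track=rewrite | github.com/sdandey/triagent | src/triagent/hooks.py | format_command_readable
-- ===== SOURCE A (Python) =====
-- def format_command_readable(command: str) -> str:
--     """Format a command with line breaks for readability.
--
--     Breaks at common argument patterns like -- flags to make
--     long commands easier to read in confirmation panels.
--
--     Args:
--         command: The command string to format
--
--     Returns:
--         Formatted command with line breaks and indentation
--     """
--     parts = []
--     current = ""
--     tokens = command.split()
--
--     for token in tokens:
--         if token.startswith("--") and current:
--             parts.append(current.strip())
--             current = f"  {token} "
--         else:
--             current += f"{token} "
--
--     if current.strip():
--         parts.append(current.strip())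
--
--     return " \\\n".join(parts)
-- ===== SOURCE B (Python) =====
-- def format_command_readable(command: str) -> str:
--     normalized = " ".join(command.split())
--     return normalized.replace(" --", " \\\n--")
-- ===== Notes on version B (the rewrite author's own statement) =====
-- stated objective: simpler
-- what changed: Replaces A's token loop with a parts list, a running 'current' accumulator and strip() calls by a two-line whole-string rewrite: normalize whitespace with ' '.join(command.split()) and insert every line break with a single str.replace(' --', ' \ --').
import Mathlib
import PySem

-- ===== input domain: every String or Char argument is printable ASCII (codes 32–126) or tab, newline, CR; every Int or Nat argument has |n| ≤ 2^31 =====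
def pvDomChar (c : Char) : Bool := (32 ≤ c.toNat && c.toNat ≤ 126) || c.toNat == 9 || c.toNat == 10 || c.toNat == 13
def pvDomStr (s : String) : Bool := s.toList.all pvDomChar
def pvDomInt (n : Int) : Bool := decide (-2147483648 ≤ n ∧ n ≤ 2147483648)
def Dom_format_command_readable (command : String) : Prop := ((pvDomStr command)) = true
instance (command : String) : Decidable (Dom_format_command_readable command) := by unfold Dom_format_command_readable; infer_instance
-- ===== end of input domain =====

-- B replaces A's token loop (parts list + running 'current' accumulator + strip calls) by a
-- whitespace normalization followed by one str.replace(" --", " \\\n--"); objective: simpler.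


-- ===== PORT A =====
-- the body of A's for-loop, acting on the state (parts, current)
def fcrStep (st : List (List Char) × List Char) (token : List Char) : List (List Char) × List Char :=
  if PySem.Chars.startswith token ['-', '-'] && !st.2.isEmpty then
    (st.1 ++ [PySem.Chars.strip st.2], ' ' :: ' ' :: (token ++ [' ']))
  else
    (st.1, st.2 ++ token ++ [' '])

def format_command_readable (command : String) : String :=
  let tokens := PySem.Chars.split₀ command.toList
  let st := tokens.foldl fcrStep ([], [])
  let parts := if (PySem.Chars.strip st.2).isEmpty then st.1 else st.1 ++ [PySem.Chars.strip st.2]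
  String.ofList (PySem.Chars.join [' ', '\\', '\n'] parts)

-- ===== PORT B =====
def format_command_readable_alt (command : String) : String :=
  let normalized := PySem.Str.join " " (PySem.Str.split₀ command)
  PySem.Str.replace normalized " --" " \\\n--"

-- ===== PRECONDITION & SPEC =====
def Spec_format_command_readable (command : String) (out : String) : Prop := out = format_command_readable_alt command
instance (command : String) (out : String) : Decidable (Spec_format_command_readable command out) := by unfold Spec_format_command_readable; infer_instance

-- ===== CLAIM (what is proved, stated in full; the proofs are below) =====
def Claim_equal_format_command_readable : Prop := ∀ (command : String), Dom_format_command_readable command → Spec_format_command_readable command (format_command_readable command)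

-- ===== LEMMAS AND PROOFS =====

-- a token produced by str.split(): nonempty and whitespace-free
def WsOk (t : List Char) : Prop := t ≠ [] ∧ ∀ c ∈ t, PySem.Chars.isspace c = false

-- a segment string: first and last character exist and are non-whitespace
def Gok (g : List Char) : Prop :=
  (∃ c cs, g = c :: cs ∧ PySem.Chars.isspace c = false) ∧
  (∃ c cs, g.reverse = c :: cs ∧ PySem.Chars.isspace c = false)

-- the normalized string after its first token: " t1 t2 …"
def tailStr : List (List Char) → List Char
  | [] => []
  | t :: ts => ' ' :: (t ++ tailStr ts)

-- the output after its first token: each token preceded by " \<newline>" (flag) or " "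
def Tout : List (List Char) → List Char
  | [] => []
  | t :: ts => (if PySem.Chars.startswith t ['-', '-'] then [' ', '\\', '\n'] else [' ']) ++ t ++ Tout ts

-- the segments A accumulates, starting from the open segment g
def segsGo : List Char → List (List Char) → List (List Char)
  | g, [] => [g]
  | g, t :: ts =>
    if PySem.Chars.startswith t ['-', '-'] then g :: segsGo t ts else segsGo (g ++ ' ' :: t) ts

-- A's code after the loop, on the final state
def finishA (st : List (List Char) × List Char) : List (List Char) :=
  if (PySem.Chars.strip st.2).isEmpty then st.1 else st.1 ++ [PySem.Chars.strip st.2]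

theorem split₀_go_ok (s : List Char) : ∀ cur acc,
    (∀ c ∈ cur, PySem.Chars.isspace c = false) → (∀ t ∈ acc, WsOk t) →
    ∀ t ∈ PySem.Chars.split₀.go s cur acc, WsOk t := by
  induction s with
  | nil =>
    intro cur acc hcur hacc t ht
    simp only [PySem.Chars.split₀.go] at ht
    split at ht
    · exact hacc t (by simpa using ht)
    · rename_i hne
      rcases (by simpa using ht : t ∈ acc ∨ t = cur.reverse) with h | rfl
      · exact hacc t h
      · exact ⟨by simpa using hne, fun c hc => hcur c (by simpa using hc)⟩
  | cons c rest ih =>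
    intro cur acc hcur hacc t ht
    simp only [PySem.Chars.split₀.go] at ht
    split at ht
    · split at ht
      · exact ih [] acc (by simp) hacc t ht
      · rename_i hne
        refine ih [] (cur.reverse :: acc) (by simp) ?_ t ht
        intro u hu
        rcases List.mem_cons.mp hu with rfl | hu
        · exact ⟨by simpa using hne, fun d hd => hcur d (by simpa using hd)⟩
        · exact hacc u hu
    · rename_i hws
      refine ih (c :: cur) acc ?_ hacc t ht
      intro d hd
      rcases List.mem_cons.mp hd with rfl | hd
      · simpa using hws
      · exact hcur d hd

theorem split₀_ok (s : List Char) : ∀ t ∈ PySem.Chars.split₀ s, WsOk t :=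
  split₀_go_ok s [] [] (by simp) (by simp)

theorem go_skip (t : List Char) : ∀ (r acc : List Char) (fuel : Nat),
    (∀ c ∈ t, c ≠ ' ') → t.length + r.length ≤ fuel →
    PySem.Chars.replace.go [' ','-','-'] [' ','\\','\n','-','-'] fuel (t ++ r) acc =
      PySem.Chars.replace.go [' ','-','-'] [' ','\\','\n','-','-'] (fuel - t.length) r (t.reverse ++ acc) := by
  induction t with
  | nil => intro r acc fuel _ _; simp
  | cons c t ih =>
    intro r acc fuel hc hlen
    cases fuel with
    | zero => simp only [List.length_cons] at hlen; omega
    | succ f =>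
      have h1 : (' ' == c) = false := by
        simp [Ne.symm (hc c (List.mem_cons_self ..))]
      have := ih r (c :: acc) f (fun d hd => hc d (List.mem_cons_of_mem _ hd))
        (by simp only [List.length_cons] at hlen; omega)
      simp only [List.cons_append, PySem.Chars.replace.go, List.isPrefixOf, h1, Bool.false_and,
        if_neg Bool.false_ne_true] at this ⊢
      rw [this]
      simp only [List.reverse_cons, List.append_assoc, List.cons_append, List.nil_append]
      congr 1
      simp only [List.length_cons]
      omega

theorem go_main (ts : List (List Char)) : ∀ (acc : List Char) (fuel : Nat),
    (∀ t ∈ ts, WsOk t) → (tailStr ts).length ≤ fuel →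
    PySem.Chars.replace.go [' ','-','-'] [' ','\\','\n','-','-'] fuel (tailStr ts) acc =
      acc.reverse ++ Tout ts := by
  induction ts with
  | nil => intro acc fuel _ _; cases fuel <;> simp [tailStr, Tout, PySem.Chars.replace.go]
  | cons t ts ih =>
    intro acc fuel hok hlen
    obtain ⟨hne, hnws⟩ := hok t (List.mem_cons_self ..)
    have hnsp : ∀ c ∈ t, c ≠ ' ' := by
      intro c hc hsp; have := hnws c hc; rw [hsp] at this; simp [PySem.Chars.isspace] at this
    have hts : ∀ u ∈ ts, WsOk u := fun u hu => hok u (List.mem_cons_of_mem _ hu)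
    simp only [tailStr, List.length_cons, List.length_append] at hlen
    cases fuel with
    | zero => omega
    | succ f =>
    by_cases hsw : PySem.Chars.startswith t ['-', '-'] = true
    · obtain ⟨t₂, rfl⟩ : ∃ t₂, t = '-' :: '-' :: t₂ := by
        rcases (PySem.Chars.startswith_iff ..).mp hsw with ⟨u, hu⟩
        exact ⟨u, hu.symm⟩
      simp only [List.length_cons] at hlen
      simp only [tailStr, PySem.Chars.replace.go]
      rw [if_pos (by simp [List.isPrefixOf])]
      show PySem.Chars.replace.go _ _ f (List.drop 3 (' ' :: ('-' :: '-' :: t₂ ++ tailStr ts))) _ = _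
      have hdrop : List.drop 3 (' ' :: ('-' :: '-' :: t₂ ++ tailStr ts)) = t₂ ++ tailStr ts := by simp
      rw [hdrop, go_skip t₂ _ _ f (fun d hd => hnsp d (by simp [hd])) (by omega),
        ih _ _ hts (by omega)]
      simp [Tout, hsw]
    · have hpre : List.isPrefixOf [' ','-','-'] (' ' :: (t ++ tailStr ts)) = false := by
        cases t with
        | nil => exact absurd rfl hne
        | cons c1 t1 =>
          by_cases h1 : c1 = '-'
          · subst h1
            cases t1 with
            | nil =>
              cases ts with
              | nil => simp [List.isPrefixOf, tailStr]
              | cons u us => simp [List.isPrefixOf, tailStr]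
            | cons c2 t2 =>
              have h2 : c2 ≠ '-' := by
                intro h; apply hsw; subst h
                simp [PySem.Chars.startswith, List.isPrefixOf]
              simp [List.isPrefixOf, Ne.symm h2]
          · simp [List.isPrefixOf, Ne.symm h1]
      simp only [tailStr, PySem.Chars.replace.go, hpre, if_neg Bool.false_ne_true]
      rw [go_skip t _ _ f hnsp (by omega), ih _ _ hts (by omega)]
      simp [Tout, hsw]

theorem dropWhile_ws_of_ws (pre : List Char) (x : List Char)
    (h : ∀ c ∈ pre, PySem.Chars.isspace c = true) :
    List.dropWhile PySem.Chars.isspace (pre ++ x) = List.dropWhile PySem.Chars.isspace x := by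
  induction pre with
  | nil => simp
  | cons c p ih =>
    simp only [List.cons_append, List.dropWhile_cons, h c (List.mem_cons_self ..)]
    exact ih fun d hd => h d (List.mem_cons_of_mem _ hd)

theorem strip_repr (pre g : List Char) (hpre : ∀ c ∈ pre, PySem.Chars.isspace c = true)
    (hg : Gok g) : PySem.Chars.strip (pre ++ g ++ [' ']) = g := by
  obtain ⟨⟨c, cs, hcons, hc⟩, ⟨d, ds, hrev, hd⟩⟩ := hg
  have h1 : List.dropWhile PySem.Chars.isspace (g ++ [' ']) = g ++ [' '] := by
    rw [hcons]; simp [hc]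
  have h2 : List.dropWhile PySem.Chars.isspace (' ' :: g.reverse) = g.reverse := by
    rw [List.dropWhile_cons, if_pos (by decide), hrev]
    simp [hd]
  simp only [PySem.Chars.strip, PySem.Chars.lstrip, PySem.Chars.rstrip, List.append_assoc]
  rw [dropWhile_ws_of_ws pre _ hpre, h1,
    show (g ++ [' ']).reverse = ' ' :: g.reverse by simp, h2, List.reverse_reverse]

theorem Gok_tok (t : List Char) (ht : WsOk t) : Gok t := by
  obtain ⟨hne, hws⟩ := ht
  constructor
  · cases t with
    | nil => exact absurd rfl hne
    | cons c cs => exact ⟨c, cs, rfl, hws c (List.mem_cons_self ..)⟩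
  · cases hrev : t.reverse with
    | nil => exact absurd (by simpa using hrev) hne
    | cons d ds =>
      refine ⟨d, ds, rfl, hws d ?_⟩
      have : d ∈ t.reverse := by rw [hrev]; exact List.mem_cons_self ..
      simpa using this

theorem Gok_ext (g t : List Char) (hg : Gok g) (ht : WsOk t) : Gok (g ++ ' ' :: t) := by
  obtain ⟨⟨c, cs, hcons, hc⟩, _⟩ := hg
  obtain ⟨_, ⟨d, ds, hrev, hd⟩⟩ := Gok_tok t ht
  constructor
  · exact ⟨c, cs ++ ' ' :: t, by rw [hcons]; simp, hc⟩
  · exact ⟨d, ds ++ ' ' :: g.reverse, by simp [hrev], hd⟩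

theorem segsGo_ne_nil (g : List Char) (ts : List (List Char)) : segsGo g ts ≠ [] := by
  induction ts generalizing g with
  | nil => simp [segsGo]
  | cons t ts ih =>
    simp only [segsGo]
    split
    · simp
    · exact ih _

theorem join_segsGo (ts : List (List Char)) : ∀ g,
    PySem.Chars.join [' ', '\\', '\n'] (segsGo g ts) = g ++ Tout ts := by
  induction ts with
  | nil => intro g; simp [segsGo, Tout, PySem.Chars.join_singleton]
  | cons t ts ih =>
    intro g
    simp only [segsGo]
    split
    · rename_i hsw
      cases hseg : segsGo t ts with
      | nil => exact absurd hseg (segsGo_ne_nil t ts)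
      | cons a l =>
        rw [PySem.Chars.join_cons_cons, ← hseg, ih t]
        simp [Tout, hsw]
    · rename_i hsw
      rw [ih]
      simp only [Tout, if_neg hsw]
      simp

theorem join_tailStr (ts : List (List Char)) : ∀ t,
    PySem.Chars.join [' '] (t :: ts) = t ++ tailStr ts := by
  induction ts with
  | nil => intro t; simp [tailStr, PySem.Chars.join_singleton]
  | cons u us ih =>
    intro t
    rw [PySem.Chars.join_cons_cons, ih u]
    simp [tailStr]

theorem foldA_main (ts : List (List Char)) : ∀ (parts : List (List Char)) (pre g : List Char),
    (∀ t ∈ ts, WsOk t) → Gok g → (∀ c ∈ pre, PySem.Chars.isspace c = true) →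
    finishA (ts.foldl fcrStep (parts, pre ++ g ++ [' '])) = parts ++ segsGo g ts := by
  induction ts with
  | nil =>
    intro parts pre g _ hg hpre
    simp only [List.foldl_nil, finishA, strip_repr pre g hpre hg]
    have : g ≠ [] := by obtain ⟨⟨c, cs, hcons, _⟩, _⟩ := hg; simp [hcons]
    simp [this, segsGo]
  | cons t ts ih =>
    intro parts pre g hok hg hpre
    have hts : ∀ u ∈ ts, WsOk u := fun u hu => hok u (List.mem_cons_of_mem _ hu)
    have hwt : WsOk t := hok t (List.mem_cons_self ..)
    rw [List.foldl_cons]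
    by_cases hsw : PySem.Chars.startswith t ['-', '-'] = true
    · have hstep : fcrStep (parts, pre ++ g ++ [' ']) t =
          (parts ++ [g], [' ', ' '] ++ t ++ [' ']) := by
        simp [fcrStep, hsw]
        rw [← List.append_assoc]
        exact strip_repr pre g hpre hg
      rw [hstep]
      show finishA (List.foldl fcrStep (parts ++ [g], [' ', ' '] ++ t ++ [' ']) ts) = _
      rw [ih (parts ++ [g]) [' ', ' '] t hts (Gok_tok t hwt) (fun c hc => by
        rcases List.mem_cons.mp hc with rfl | hc
        · decide
        · rcases List.mem_cons.mp hc with rfl | hc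
          · decide
          · simp at hc)]
      simp [segsGo, hsw]
    · have hstep : fcrStep (parts, pre ++ g ++ [' ']) t =
          (parts, pre ++ (g ++ ' ' :: t) ++ [' ']) := by
        simp [fcrStep, hsw]
      rw [hstep, ih parts pre (g ++ ' ' :: t) hts (Gok_ext g t hg hwt) hpre]
      simp [segsGo, hsw]

-- ===== VERDICT (by name: the statement is the Claim_ definition above) =====
theorem format_command_readable_spec : Claim_equal_format_command_readable := by
  intro command _
  unfold Spec_format_command_readable format_command_readable format_command_readable_alt
  have hnorm : (PySem.Str.join " " (PySem.Str.split₀ command)).toList =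
      PySem.Chars.join [' '] (PySem.Chars.split₀ command.toList) := by
    simp [PySem.Str.join, PySem.Str.split₀, List.map_map, Function.comp_def]
  rw [PySem.Str.replace]
  cases hts : PySem.Chars.split₀ command.toList with
  | nil =>
    rw [hnorm, hts]
    simp [PySem.Chars.replace, PySem.Chars.join, PySem.Chars.strip, PySem.Chars.lstrip,
      PySem.Chars.rstrip, List.intercalate, PySem.Chars.replace.go]
  | cons t rest =>
    have hok := split₀_ok command.toList
    rw [hts] at hok
    have hwt : WsOk t := hok t (List.mem_cons_self ..)
    have hrest : ∀ u ∈ rest, WsOk u := fun u hu => hok u (List.mem_cons_of_mem _ hu)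
    -- A side
    have hA : (List.foldl fcrStep ([], []) (t :: rest)) =
        List.foldl fcrStep ([], [] ++ t ++ [' ']) rest := by
      rw [List.foldl_cons]
      congr 1
      simp [fcrStep]
    have hAmain := foldA_main rest [] [] t hrest (Gok_tok t hwt) (by simp)
    -- B side
    have hnsp : ∀ c ∈ t, c ≠ ' ' := by
      intro c hc hsp
      have := hwt.2 c hc; rw [hsp] at this; simp [PySem.Chars.isspace] at this
    rw [hnorm, hts, join_tailStr rest t]
    rw [show (" --" : String).toList = [' ', '-', '-'] from rfl,
      show (" \\\n--" : String).toList = [' ', '\\', '\n', '-', '-'] from rfl]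
    rw [PySem.Chars.replace]
    rw [if_neg (by simp)]
    rw [go_skip t _ _ _ hnsp (by simp),
      go_main rest _ _ hrest (by simp), List.append_nil, List.reverse_reverse]
    show String.ofList (PySem.Chars.join [' ', '\\', '\n']
      (finishA (List.foldl fcrStep ([], []) (t :: rest)))) = _
    rw [hA]
    show String.ofList (PySem.Chars.join [' ', '\\', '\n']
      (finishA (List.foldl fcrStep ([], [] ++ t ++ [' ']) rest))) = _
    rw [hAmain, List.nil_append, join_segsGo rest t]
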